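-- pv_equiv track=rewrite | github.com/vadym2003/DSTY-28147 | DSTY28147.py | text_to_byte_for_gamma
-- ===== SOURCE A (Python) =====
-- def text_to_byte_for_gamma(text):
--     res=''
--     bit_text=""
--     bit_list=[]
--     bit_text=''.join(format(ord(i), '08b') for i in text)
--
--     for i in range(int(len(bit_text)/64)):
--         try:
--             bit_list.append(bit_text[:64])
--             bit_text=bit_text[64:]
--         except:
--             break
--     bit_list.append(bit_text)
--
--     return bit_list
-- ===== SOURCE B (Python) =====
-- def text_to_byte_for_gamma(text):
--     # One streaming pass: append each character's 8 bits to a buffer and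
--     # flush the buffer to the result whenever it reaches 64 bits.
--     bit_list = []
--     buf = ''
--     for c in text:
--         buf += format(ord(c), '08b')
--         if len(buf) == 64:
--             bit_list.append(buf)
--             buf = ''
--     bit_list.append(buf)
--     return bit_list
-- ===== Notes on version B (the rewrite author's own statement) =====
-- stated objective: faster
-- what changed: Instead of joining the full bit string and repeatedly slicing off (and copying) the first 64 bits, B streams over the characters once, accumulating bits in a buffer that is flushed to the result each time it reaches 64 bits.
import Mathlib
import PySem

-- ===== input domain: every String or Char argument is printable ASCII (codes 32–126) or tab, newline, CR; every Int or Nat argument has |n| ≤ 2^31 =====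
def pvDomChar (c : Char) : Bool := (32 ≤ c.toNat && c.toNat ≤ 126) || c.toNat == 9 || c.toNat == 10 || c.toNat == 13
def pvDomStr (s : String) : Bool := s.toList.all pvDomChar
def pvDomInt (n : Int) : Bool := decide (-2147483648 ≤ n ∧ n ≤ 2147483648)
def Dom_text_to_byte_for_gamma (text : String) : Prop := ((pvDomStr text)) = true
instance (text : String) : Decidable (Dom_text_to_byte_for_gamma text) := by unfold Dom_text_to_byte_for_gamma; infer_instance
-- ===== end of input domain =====

-- B replaces A's "join all bits, then repeatedly slice off 64" (quadratic re-slicing)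
-- by a single streaming pass with a 64-bit buffer; objective: faster (constant/asymptotic
-- mechanism: no repeated copying of the remaining bit string).

-- binary digits of n, most significant first ([] for 0); Python bin(n) without the '0b'
def pvBits (n : Nat) : List Char :=
  if h : n = 0 then [] else pvBits (n / 2) ++ [if n % 2 = 1 then '1' else '0']
decreasing_by exact Nat.div_lt_self (Nat.pos_of_ne_zero h) (by norm_num)

-- format(n, '08b'): binary, left-padded with '0' to width 8 (exact for every n ≥ 1;
-- for n = 0 the padded result "00000000" also matches Python)
def pvFmt08b (n : Nat) : List Char :=
  List.replicate (8 - (pvBits n).length) '0' ++ pvBits n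

-- ===== PORT A =====
-- one iteration of A's for-loop (the try/except never fires: list.append and
-- slicing of an in-range str cannot raise); slices [:64]/[64:] with nonnegative
-- bounds are exactly take/drop
def pvAStep (st : List Char × List String) (_ : Nat) : List Char × List String :=
  (st.1.drop 64, st.2 ++ [String.mk (st.1.take 64)])

def text_to_byte_for_gamma (text : String) : List String :=
  -- bit_text = ''.join(format(ord(i),'08b') for i in text)
  let bit_text := (text.toList.map (fun c => pvFmt08b c.toNat)).flatten
  -- int(len(bit_text)/64) = len / 64 (exact: len(bit_text) is a nonnegative int)
  let st := (List.range (bit_text.length / 64)).foldl pvAStep (bit_text, [])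
  st.2 ++ [String.mk st.1]

-- ===== PORT B =====
def pvBStep (st : List String × List Char) (c : Char) : List String × List Char :=
  let buf := st.2 ++ pvFmt08b c.toNat
  if buf.length = 64 then (st.1 ++ [String.mk buf], []) else (st.1, buf)

def text_to_byte_for_gamma_alt (text : String) : List String :=
  let st := text.toList.foldl pvBStep ([], [])
  st.1 ++ [String.mk st.2]

-- ===== PRECONDITION & SPEC =====
def Spec_text_to_byte_for_gamma (text : String) (out : List String) : Prop := out = text_to_byte_for_gamma_alt text
instance (text : String) (out : List String) : Decidable (Spec_text_to_byte_for_gamma text out) := by unfold Spec_text_to_byte_for_gamma; infer_instance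

-- ===== CLAIM (what is proved, stated in full; the proofs are below) =====
def Claim_equal_text_to_byte_for_gamma : Prop := ∀ (text : String), Dom_text_to_byte_for_gamma text → Spec_text_to_byte_for_gamma text (text_to_byte_for_gamma text)

-- ===== LEMMAS AND PROOFS =====

-- the first n 64-bit blocks of L, front to back
def pvBlocks : List Char → Nat → List String
  | _, 0 => []
  | L, n + 1 => String.mk (L.take 64) :: pvBlocks (L.drop 64) n

-- canonical result: ⌊|L|/64⌋ full blocks plus the remainder
def pvSpec (L : List Char) : List String :=
  pvBlocks L (L.length / 64) ++ [String.mk (L.drop (64 * (L.length / 64)))]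

theorem pvBits_len_le : ∀ (k n : Nat), n < 2 ^ k → (pvBits n).length ≤ k := by
  intro k
  induction k with
  | zero =>
      intro n hn
      have : n = 0 := by omega
      subst this
      simp [pvBits]
  | succ k ih =>
      intro n hn
      by_cases h : n = 0
      · subst h; simp [pvBits]
      · rw [pvBits]
        simp only [h, dite_false, List.length_append, List.length_cons, List.length_nil]
        have hdiv : n / 2 < 2 ^ k := by
          have h2 : 2 ^ (k + 1) = 2 * 2 ^ k := by ring
          omega
        have := ih (n / 2) hdiv
        omega

theorem pvFmt08b_len (n : Nat) (h : n < 256) : (pvFmt08b n).length = 8 := by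
  have := pvBits_len_le 8 n (by norm_num; omega)
  simp [pvFmt08b]
  omega

theorem pvBlocks_succ (n : Nat) : ∀ (L : List Char),
    pvBlocks L (n + 1) = pvBlocks L n ++ [String.mk ((L.drop (64 * n)).take 64)] := by
  induction n with
  | zero => intro L; simp [pvBlocks]
  | succ n ih =>
      intro L
      show String.mk (L.take 64) :: pvBlocks (L.drop 64) (n + 1) = _
      rw [ih (L.drop 64)]
      simp [pvBlocks, List.drop_drop]
      congr 3
      ring

theorem pvALoop : ∀ (n : Nat) (L : List Char) (acc : List String),
    (List.range n).foldl pvAStep (L, acc) = (L.drop (64 * n), acc ++ pvBlocks L n) := by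
  intro n
  induction n with
  | zero => intro L acc; simp [pvBlocks]
  | succ n ih =>
      intro L acc
      rw [List.range_succ, List.foldl_append, ih]
      simp only [List.foldl_cons, List.foldl_nil, pvAStep, List.drop_drop]
      rw [pvBlocks_succ, show 64 * (n + 1) = 64 * n + 64 from by ring]
      simp

theorem pvA_eq_spec (text : String) :
    text_to_byte_for_gamma text = pvSpec ((text.toList.map (fun c => pvFmt08b c.toNat)).flatten) := by
  unfold text_to_byte_for_gamma pvSpec
  dsimp only
  rw [pvALoop]
  simp

theorem pvSpec_small (L : List Char) (h : L.length < 64) : pvSpec L = [String.mk L] := by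
  unfold pvSpec
  rw [Nat.div_eq_of_lt h]
  simp [pvBlocks]

theorem pvSpec_shift (X L : List Char) (h : X.length = 64) :
    pvSpec (X ++ L) = String.mk X :: pvSpec L := by
  unfold pvSpec
  have hlen : (X ++ L).length = L.length + 64 := by simp [h]; omega
  have hdiv : (X ++ L).length / 64 = L.length / 64 + 1 := by
    rw [hlen, Nat.add_div_right _ (by norm_num)]
  rw [hdiv]
  have htake : (X ++ L).take 64 = X := by
    rw [← h, List.take_left]
  have hdrop : (X ++ L).drop 64 = L := by
    rw [← h, List.drop_left]
  have hdrop2 : (X ++ L).drop (64 * (L.length / 64 + 1)) = L.drop (64 * (L.length / 64)) := by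
    have : 64 * (L.length / 64 + 1) = 64 + 64 * (L.length / 64) := by ring
    rw [this, ← List.drop_drop, hdrop]
  rw [show pvBlocks (X ++ L) (L.length / 64 + 1)
        = String.mk ((X ++ L).take 64) :: pvBlocks ((X ++ L).drop 64) (L.length / 64) from rfl,
      htake, hdrop, hdrop2]
  simp

theorem pvBFold : ∀ (cs : List Char) (res : List String) (buf : List Char),
    (∀ c ∈ cs, (pvFmt08b c.toNat).length = 8) → buf.length < 64 → 8 ∣ buf.length →
    (let st := cs.foldl pvBStep (res, buf); st.1 ++ [String.mk st.2])
      = res ++ pvSpec (buf ++ (cs.map (fun c => pvFmt08b c.toNat)).flatten) := by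
  intro cs
  induction cs with
  | nil =>
      intro res buf _ hlt _
      simp only [List.foldl_nil, List.map_nil, List.flatten_nil, List.append_nil]
      rw [pvSpec_small buf hlt]
  | cons c cs ih =>
      intro res buf hall hlt hdvd
      have hc : (pvFmt08b c.toNat).length = 8 := hall c (by simp)
      have hall' : ∀ x ∈ cs, (pvFmt08b x.toNat).length = 8 := fun x hx => hall x (by simp [hx])
      simp only [List.foldl_cons, List.map_cons, List.flatten_cons]
      by_cases h64 : (buf ++ pvFmt08b c.toNat).length = 64
      · have hstep : pvBStep (res, buf) c = (res ++ [String.mk (buf ++ pvFmt08b c.toNat)], []) := by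
          simp [pvBStep, h64]
        rw [hstep, ih _ [] hall' (by norm_num) (by norm_num)]
        rw [show buf ++ (pvFmt08b c.toNat ++ (cs.map (fun c => pvFmt08b c.toNat)).flatten)
              = (buf ++ pvFmt08b c.toNat) ++ (cs.map (fun c => pvFmt08b c.toNat)).flatten from by
            simp]
        rw [pvSpec_shift _ _ h64]
        simp
      · have hlt' : (buf ++ pvFmt08b c.toNat).length < 64 := by
          obtain ⟨j, hj⟩ := hdvd
          simp only [List.length_append, hc] at h64 ⊢
          omega
        have hdvd' : 8 ∣ (buf ++ pvFmt08b c.toNat).length := by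
          simp only [List.length_append, hc]
          exact Dvd.dvd.add hdvd ⟨1, rfl⟩
        have hstep : pvBStep (res, buf) c = (res, buf ++ pvFmt08b c.toNat) := by
          unfold pvBStep; rw [if_neg h64]
        rw [hstep, ih _ _ hall' hlt' hdvd']
        congr 1
        congr 1
        simp

-- ===== VERDICT (by name: the statement is the Claim_ definition above) =====
theorem text_to_byte_for_gamma_spec : Claim_equal_text_to_byte_for_gamma := by
  intro text hdom
  unfold Spec_text_to_byte_for_gamma
  have hall : ∀ c ∈ text.toList, (pvFmt08b c.toNat).length = 8 := by
    intro c hc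
    have := List.all_eq_true.mp hdom c hc
    simp only [pvDomChar, Bool.or_eq_true, Bool.and_eq_true, decide_eq_true_eq, beq_iff_eq] at this
    exact pvFmt08b_len c.toNat (by omega)
  rw [pvA_eq_spec]
  unfold text_to_byte_for_gamma_alt
  rw [pvBFold text.toList [] [] hall (by norm_num) (by norm_num)]
  simp
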